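-- pv_equiv track=rewrite | github.com/RohithPrakash/KannadaOCR | preprocessing/Segmentation.py | lineArray
-- ===== SOURCE A (Python) =====
-- def lineArray(array):
--     listXUpper = []
--     listXLower = []
--     for y in range(5, len(array) - 5):
--         s_a, s_p = startLine(y, array)
--         e_a, e_p = endline(y, array)
--         if s_a >= 7 and s_p >= 5:
--             listXUpper.append(y)
--         if e_a >= 5 and e_p >= 7:
--             listXLower.append(y)
--     return listXUpper, listXLower
--
-- def startLine(y, array):
--     countAhead = 0
--     countPrevious = 0
--     for i in array[y:y+10]:
--         if i > 3:
--             countAhead += 1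
--     for i in array[y-10:y]:
--         if i == 0:
--             countPrevious += 1
--     return countAhead, countPrevious
--
-- def endline(y, array):
--     countAhead = 0
--     countPrevious = 0
--     for i in array[y:y+10]:
--         if i == 0:
--             countAhead += 1
--     for i in array[y-10:y]:
--         if i > 3:
--             countPrevious += 1
--     return countAhead, countPrevious
-- ===== SOURCE B (Python) =====
-- def lineArray(array):
--     n = len(array)
--     # prefix counts: pgt[k] = #{i in array[:k] : i > 3}, pz[k] = #{i in array[:k] : i == 0}
--     pgt = [0]
--     pz = [0]
--     cg = 0
--     cz = 0
--     for v in array: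
--         if v > 3:
--             cg += 1
--         if v == 0:
--             cz += 1
--         pgt.append(cg)
--         pz.append(cz)
--     upper = []
--     lower = []
--     for y in range(5, n - 5):
--         hi = y + 10 if y + 10 < n else n
--         s_a = pgt[hi] - pgt[y]
--         e_a = pz[hi] - pz[y]
--         if y >= 10:
--             s_p = pz[y] - pz[y - 10]
--             e_p = pgt[y] - pgt[y - 10]
--         else:
--             # array[y-10:y] is empty for 5 <= y < 10 (negative start past the end)
--             s_p = 0
--             e_p = 0
--         if s_a >= 7 and s_p >= 5:
--             upper.append(y)
--         if e_a >= 5 and e_p >= 7: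
--             lower.append(y)
--     return upper, lower
-- ===== Notes on version B (the rewrite author's own statement) =====
-- stated objective: faster
-- what changed: Replaces the per-row rescans of the two 10-pixel windows (four slice passes per y) by two prefix-count arrays built in one pass, so each window count is a constant-time prefix difference.
import Mathlib
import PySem

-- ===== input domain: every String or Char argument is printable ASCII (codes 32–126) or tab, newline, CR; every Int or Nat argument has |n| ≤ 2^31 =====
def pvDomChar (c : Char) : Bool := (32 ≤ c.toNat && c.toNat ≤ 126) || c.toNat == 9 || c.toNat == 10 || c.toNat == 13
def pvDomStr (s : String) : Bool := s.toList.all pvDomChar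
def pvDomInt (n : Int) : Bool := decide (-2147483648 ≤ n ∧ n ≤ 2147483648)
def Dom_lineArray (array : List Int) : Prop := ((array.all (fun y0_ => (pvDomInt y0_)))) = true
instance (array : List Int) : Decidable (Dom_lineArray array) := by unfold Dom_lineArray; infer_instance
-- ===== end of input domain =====

-- B replaces the four 10-element window rescans per row by two prefix-count arrays
-- built once, reading each window count as a prefix difference (constant-factor speedup).

-- ===== PORT A =====
def startLineA (y : Int) (array : List Int) : Int × Int :=
  let countAhead := (PySem.List.slice array (some y) (some (y + 10))).foldl
    (fun acc i => if i > 3 then acc + 1 else acc) (0 : Int)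
  let countPrevious := (PySem.List.slice array (some (y - 10)) (some y)).foldl
    (fun acc i => if i = 0 then acc + 1 else acc) (0 : Int)
  (countAhead, countPrevious)

def endlineA (y : Int) (array : List Int) : Int × Int :=
  let countAhead := (PySem.List.slice array (some y) (some (y + 10))).foldl
    (fun acc i => if i = 0 then acc + 1 else acc) (0 : Int)
  let countPrevious := (PySem.List.slice array (some (y - 10)) (some y)).foldl
    (fun acc i => if i > 3 then acc + 1 else acc) (0 : Int)
  (countAhead, countPrevious)

def lineArray (array : List Int) : List Int × List Int :=
  (PySem.List.pyRange 5 ((array.length : Int) - 5) 1).foldl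
    (fun acc y =>
      let s := startLineA y array
      let e := endlineA y array
      (if s.1 ≥ 7 ∧ s.2 ≥ 5 then acc.1 ++ [y] else acc.1,
       if e.1 ≥ 5 ∧ e.2 ≥ 7 then acc.2 ++ [y] else acc.2))
    ([], [])

-- ===== PORT B =====
-- one pass of Source B's prefix loop: state = (pgt, pz, cg, cz)
def prefixStepB (st : List Int × List Int × Int × Int) (v : Int) :
    List Int × List Int × Int × Int :=
  let cg := if v > 3 then st.2.2.1 + 1 else st.2.2.1
  let cz := if v = 0 then st.2.2.2 + 1 else st.2.2.2
  (st.1 ++ [cg], st.2.1 ++ [cz], cg, cz)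

def lineArray_alt (array : List Int) : List Int × List Int :=
  let n : Int := array.length
  let st := array.foldl prefixStepB ([0], [0], 0, 0)
  let pgt := st.1
  let pz := st.2.1
  (PySem.List.pyRange 5 (n - 5) 1).foldl
    (fun acc y =>
      let hi := if y + 10 < n then y + 10 else n
      let sa := PySem.List.pyGetD pgt hi 0 - PySem.List.pyGetD pgt y 0
      let ea := PySem.List.pyGetD pz hi 0 - PySem.List.pyGetD pz y 0
      let sp := if y ≥ 10 then PySem.List.pyGetD pz y 0 - PySem.List.pyGetD pz (y - 10) 0 else 0
      let ep := if y ≥ 10 then PySem.List.pyGetD pgt y 0 - PySem.List.pyGetD pgt (y - 10) 0 else 0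
      (if sa ≥ 7 ∧ sp ≥ 5 then acc.1 ++ [y] else acc.1,
       if ea ≥ 5 ∧ ep ≥ 7 then acc.2 ++ [y] else acc.2))
    ([], [])

-- ===== PRECONDITION & SPEC =====
def Spec_lineArray (array : List Int) (out : List Int × List Int) : Prop := out = lineArray_alt array
instance (array : List Int) (out : List Int × List Int) : Decidable (Spec_lineArray array out) := by unfold Spec_lineArray; infer_instance

-- ===== CLAIM (what is proved, stated in full; the proofs are below) =====
def Claim_equal_lineArray : Prop := ∀ (array : List Int), Dom_lineArray array → Spec_lineArray array (lineArray array)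

-- ===== LEMMAS AND PROOFS =====

-- the pure prefix list Source B's first loop computes, starting from counter c
def prefListB (p : Int → Bool) : List Int → Int → List Int
  | [], _ => []
  | v :: r, c => let c' := if p v then c + 1 else c; c' :: prefListB p r c'

theorem prefixStepB_fst (array : List Int) (pg pz : List Int) (cg cz : Int) :
    (array.foldl prefixStepB (pg, pz, cg, cz)).1
      = pg ++ prefListB (fun i => decide (3 < i)) array cg := by
  induction array generalizing pg pz cg cz with
  | nil => simp [prefListB]
  | cons v r ih =>
      simp only [List.foldl_cons, prefixStepB, prefListB]
      rw [ih]
      by_cases h : (3 : Int) < v <;> simp [h]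

theorem prefixStepB_snd (array : List Int) (pg pz : List Int) (cg cz : Int) :
    (array.foldl prefixStepB (pg, pz, cg, cz)).2.1
      = pz ++ prefListB (fun i => decide (i = 0)) array cz := by
  induction array generalizing pg pz cg cz with
  | nil => simp [prefListB]
  | cons v r ih =>
      simp only [List.foldl_cons, prefixStepB, prefListB]
      rw [ih]
      by_cases h : v = (0 : Int) <;> simp [h]

theorem prefListB_getD (p : Int → Bool) (array : List Int) (c : Int) (k : Nat)
    (hk : k < array.length) :
    (prefListB p array c).getD k 0 = c + ((array.take (k + 1)).countP p : Int) := by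
  induction array generalizing c k with
  | nil => simp at hk
  | cons v r ih =>
      cases k with
      | zero =>
          by_cases h : p v <;> simp [prefListB, h]
      | succ k =>
          simp only [List.length_cons] at hk
          simp only [prefListB, List.getD_cons_succ, List.take_succ_cons, List.countP_cons]
          rw [ih _ _ (by omega)]
          by_cases h : p v
          · simp [h]
            ring
          · simp [h]

-- lookup in Source B's prefix array: count over the first k elements
theorem prefGet (p : Int → Bool) (array : List Int) (k : Nat) (hk : k ≤ array.length) :
    PySem.List.pyGetD ((0 : Int) :: prefListB p array 0) (k : Int) 0
      = ((array.take k).countP p : Int) := by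
  rw [PySem.List.pyGetD_natCast]
  cases k with
  | zero => simp
  | succ k =>
      simp only [List.getD_cons_succ]
      rw [prefListB_getD p array 0 k (by omega)]
      simp

-- counting a window by prefix difference
theorem countP_window (p : Int → Bool) (l : List Int) (a m : Nat) :
    ((l.take (a + m)).countP p : Int)
      = ((l.take a).countP p : Int) + (((l.drop a).take m).countP p : Int) := by
  rw [List.take_add, List.countP_append]
  push_cast; ring

-- A's window loop is a countP
theorem foldl_count_gt (l : List Int) :
    l.foldl (fun acc i => if i > 3 then acc + 1 else acc) (0 : Int)
      = (l.countP (fun i => decide (3 < i)) : Int) := by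
  rw [PySem.List.foldl_ite_add_one]; simp

theorem foldl_count_zero (l : List Int) :
    l.foldl (fun acc i => if i = 0 then acc + 1 else acc) (0 : Int)
      = (l.countP (fun i => decide (i = 0)) : Int) := by
  rw [PySem.List.foldl_ite_add_one]; simp

-- the ahead window slice, as drop/take
theorem slice_ahead (array : List Int) (a : Nat) :
    PySem.List.slice array (some (a : Int)) (some ((a : Int) + 10))
      = (array.drop a).take 10 := by
  exact_mod_cast PySem.List.slice_natCast_add array a 10

-- the previous window slice for y ≥ 10
theorem slice_prev_ge (array : List Int) (a : Nat) (ha : 10 ≤ a) :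
    PySem.List.slice array (some ((a : Int) - 10)) (some (a : Int))
      = (array.drop (a - 10)).take 10 := by
  have h1 : ((a : Int) - 10) = ((a - 10 : Nat) : Int) := by omega
  rw [h1]
  rw [PySem.List.slice_natCast]
  congr 1
  omega

-- the previous window slice is empty for 5 ≤ y < 10 (negative start beyond the end)
theorem slice_prev_lt (array : List Int) (a : Nat) (h5 : 5 ≤ a) (h10 : a < 10)
    (hn : a + 5 < array.length) :
    PySem.List.slice array (some ((a : Int) - 10)) (some (a : Int)) = [] := by
  apply List.eq_nil_of_length_eq_zero
  rw [PySem.List.length_slice]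
  have hk : ((a : Int) - 10) = -(((10 - a : Nat)) : Int) := by omega
  rw [hk, PySem.List.clampIdx_neg_natCast _ _ (by omega), PySem.List.clampIdx_natCast]
  omega

-- ahead-window count as a prefix difference (B's hi = min(y+10, n))
theorem windowAhead (p : Int → Bool) (array : List Int) (a : Nat) (han : a + 5 < array.length) :
    PySem.List.pyGetD ((0 : Int) :: prefListB p array 0)
        (if (a : Int) + 10 < (array.length : Int) then (a : Int) + 10 else (array.length : Int)) 0
      - PySem.List.pyGetD ((0 : Int) :: prefListB p array 0) ((a : Int)) 0
    = (((array.drop a).take 10).countP p : Int) := by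
  by_cases h : (a : Int) + 10 < (array.length : Int)
  · have hc : (a : Int) + 10 = ((a + 10 : Nat) : Int) := by push_cast; ring
    rw [if_pos h, hc, prefGet p array (a + 10) (by omega), prefGet p array a (by omega),
      countP_window p array a 10]
    ring
  · rw [if_neg h, prefGet p array array.length le_rfl, prefGet p array a (by omega)]
    have hd : (array.drop a).take 10 = array.drop a :=
      List.take_of_length_le (by simp; omega)
    have hsplit : array.countP p = (array.take a).countP p + (array.drop a).countP p := by
      conv_lhs => rw [← List.take_append_drop a array]
      rw [List.countP_append]
    rw [hd, List.take_length]
    omega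

-- previous-window count as a prefix difference (y ≥ 10)
theorem windowPrev (p : Int → Bool) (array : List Int) (a : Nat) (h10 : 10 ≤ a)
    (han : a ≤ array.length) :
    PySem.List.pyGetD ((0 : Int) :: prefListB p array 0) ((a : Int)) 0
      - PySem.List.pyGetD ((0 : Int) :: prefListB p array 0) ((a : Int) - 10) 0
    = (((array.drop (a - 10)).take 10).countP p : Int) := by
  rw [show ((a : Int) - 10) = ((a - 10 : Nat) : Int) from by omega,
    prefGet p array a han, prefGet p array (a - 10) (by omega)]
  have h := countP_window p array (a - 10) 10
  rw [show a - 10 + 10 = a from by omega] at h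
  omega

-- ===== VERDICT (by name: the statement is the Claim_ definition above) =====
theorem lineArray_spec : Claim_equal_lineArray := by
  intro array _
  unfold Spec_lineArray
  simp only [lineArray, lineArray_alt]
  rw [prefixStepB_fst, prefixStepB_snd]
  apply PySem.List.foldl_congr_mem
  intro acc y hy
  rw [PySem.List.mem_pyRange_one] at hy
  obtain ⟨hy5, hyn⟩ := hy
  obtain ⟨a, rfl⟩ : ∃ a : Nat, y = (a : Int) := ⟨y.toNat, by omega⟩
  have ha5 : 5 ≤ a := by exact_mod_cast hy5
  have han : a + 5 < array.length := by omega
  by_cases h10 : 10 ≤ a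
  · simp only [startLineA, endlineA, slice_ahead, slice_prev_ge array a h10,
      foldl_count_gt, foldl_count_zero, List.singleton_append,
      windowAhead (array := array) (a := a) (han := han),
      windowPrev (array := array) (a := a) (h10 := h10) (han := by omega),
      if_pos (show (a : Int) ≥ 10 from by exact_mod_cast h10)]
  · simp only [startLineA, endlineA, slice_ahead, slice_prev_lt array a ha5 (by omega) han,
      foldl_count_gt, foldl_count_zero, List.singleton_append,
      windowAhead (array := array) (a := a) (han := han),
      if_neg (show ¬ ((a : Int) ≥ 10) from by exact_mod_cast h10)]
    simp
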